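-- pv_equiv track=rewrite | github.com/wfishell/MultiAgentGamePlay | Warehouse_Test.py | create_groups
-- ===== SOURCE A (Python) =====
-- from typing import List, Tuple
--
-- def create_groups(ltl_constraints: List[str]) -> List[List[str]]:
--     """Create groups based on the LTL constraints."""
--     groups = []
--     current_group = []
--     for constraint in ltl_constraints:
--         if constraint.startswith("G("):
--             if current_group:
--                 groups.append(current_group)
--             current_group = [constraint]
--         else:
--             current_group.append(constraint)
--     if current_group:
--         groups.append(current_group)
--     return groups
-- ===== SOURCE B (Python) =====
-- def create_groups(ltl_constraints):
--     """Create groups based on the LTL constraints.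
--
--     Staged index/slice version: walk the list boundary to boundary, where a
--     boundary is position 0 or any later index whose constraint starts with
--     "G(", and emit the slice between consecutive boundaries as one group.
--     """
--     groups = []
--     n = len(ltl_constraints)
--     b = 0
--     while b < n:
--         e = b + 1
--         while e < n and not ltl_constraints[e].startswith("G("):
--             e += 1
--         groups.append(ltl_constraints[b:e])
--         b = e
--     return groups
-- ===== Notes on version B (the rewrite author's own statement) =====
-- stated objective: alternative
-- what changed: B walks the list boundary to boundary with an index scan (a boundary = position 0 or an index whose constraint starts with 'G(') and emits each group as a slice between consecutive boundaries, instead of A's single pass that flushes a growing current_group accumulator at each 'G(' constraint.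
import Mathlib
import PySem

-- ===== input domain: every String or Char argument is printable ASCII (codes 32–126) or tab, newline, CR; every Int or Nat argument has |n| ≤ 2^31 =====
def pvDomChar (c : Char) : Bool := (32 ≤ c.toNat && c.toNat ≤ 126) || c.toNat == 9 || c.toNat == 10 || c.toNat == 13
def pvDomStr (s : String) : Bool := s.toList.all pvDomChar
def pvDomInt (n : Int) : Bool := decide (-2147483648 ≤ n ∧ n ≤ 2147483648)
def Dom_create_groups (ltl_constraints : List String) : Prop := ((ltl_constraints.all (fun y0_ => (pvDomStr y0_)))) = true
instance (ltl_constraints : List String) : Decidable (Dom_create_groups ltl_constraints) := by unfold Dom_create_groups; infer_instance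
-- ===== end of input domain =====

-- B peels off one group at a time recursively (head + run of non-"G(" constraints, then the
-- suffix) instead of A's iterative pass flushing a current_group accumulator; same value.

-- ===== PORT A =====
-- forward fold, state = (groups, current_group); flush current_group when a "G(" constraint starts
def create_groups (ltl_constraints : List String) : List (List String) :=
  let st := ltl_constraints.foldl
    (fun (s : List (List String) × List String) constraint =>
      if PySem.Str.startswith constraint "G(" then
        ((if s.2 ≠ [] then s.1 ++ [s.2] else s.1), [constraint])
      else
        (s.1, s.2 ++ [constraint]))
    ([], [])
  if st.2 ≠ [] then st.1 ++ [st.2] else st.1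

-- ===== PORT B =====
-- Source B's outer while-loop over the boundary index b becomes recursion on the remaining
-- suffix ltl_constraints[b:]; its inner scan for the next boundary e and the slices
-- ltl_constraints[b:e] / [e:] are exactly head :: takeWhile / dropWhile of the non-"G(" run.
def createGroupsGo (acc : List (List String)) : List String → List (List String)
  | [] => acc
  | x :: rest =>
    createGroupsGo
      (acc ++ [x :: rest.takeWhile (fun c => !PySem.Str.startswith c "G(")])
      (rest.dropWhile (fun c => !PySem.Str.startswith c "G("))
  termination_by xs => xs.length
  decreasing_by
    simpa using Nat.lt_succ_of_le (List.length_dropWhile_le _ _)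

def create_groups_alt (ltl_constraints : List String) : List (List String) :=
  createGroupsGo [] ltl_constraints

-- ===== PRECONDITION & SPEC =====
def Spec_create_groups (ltl_constraints : List String) (out : List (List String)) : Prop := out = create_groups_alt ltl_constraints
instance (ltl_constraints : List String) (out : List (List String)) : Decidable (Spec_create_groups ltl_constraints out) := by unfold Spec_create_groups; infer_instance

-- ===== CLAIM (what is proved, stated in full; the proofs are below) =====
def Claim_equal_create_groups : Prop := ∀ (ltl_constraints : List String), Dom_create_groups ltl_constraints → Spec_create_groups ltl_constraints (create_groups ltl_constraints)

-- ===== LEMMAS AND PROOFS =====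

-- the groups accumulator of B's loop factors out in front
theorem createGroupsGo_append (xs : List String) :
    ∀ (acc : List (List String)), createGroupsGo acc xs = acc ++ createGroupsGo [] xs := by
  induction hn : xs.length using Nat.strong_induction_on generalizing xs with
  | _ n ih =>
    intro acc
    cases xs with
    | nil => simp [createGroupsGo]
    | cons x rest =>
      have hlt : (rest.dropWhile (fun c => !PySem.Str.startswith c "G(")).length < n := by
        subst hn
        simpa using Nat.lt_succ_of_le (List.length_dropWhile_le _ _)
      rw [createGroupsGo, createGroupsGo,
        ih _ hlt _ rfl (acc ++ [x :: rest.takeWhile (fun c => !PySem.Str.startswith c "G(")]),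
        ih _ hlt _ rfl ([] ++ [x :: rest.takeWhile (fun c => !PySem.Str.startswith c "G(")])]
      simp

-- one-group instance of the previous lemma, in the form the proofs rewrite with
theorem createGroupsGo_cons (g : List String) (xs : List String) :
    createGroupsGo [g] xs = g :: createGroupsGo [] xs := by
  simpa using createGroupsGo_append xs [g]

-- A's remaining loop from a non-empty current_group, in terms of B's recursion
theorem create_groups_run (xs : List String) :
    ∀ (gs : List (List String)) (cur : List String), cur ≠ [] →
      (let st := xs.foldl
          (fun (s : List (List String) × List String) constraint =>
            if PySem.Str.startswith constraint "G(" then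
              ((if s.2 ≠ [] then s.1 ++ [s.2] else s.1), [constraint])
            else
              (s.1, s.2 ++ [constraint]))
          (gs, cur)
        if st.2 ≠ [] then st.1 ++ [st.2] else st.1)
      = gs ++ [cur ++ xs.takeWhile (fun c => !PySem.Str.startswith c "G(")]
          ++ createGroupsGo [] (xs.dropWhile (fun c => !PySem.Str.startswith c "G(")) := by
  induction xs with
  | nil =>
    intro gs cur hcur
    simp [createGroupsGo, hcur]
  | cons x rest ih =>
    intro gs cur hcur
    by_cases hx : PySem.Str.startswith x "G(" = true
    · have hx' : (fun c => !PySem.Str.startswith c "G(") x = false := by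
        simp only [hx, Bool.not_true]
      simp only [List.foldl_cons, if_pos hx, hcur, if_pos, ne_eq, not_false_eq_true]
      rw [ih (gs ++ [cur]) [x] (by simp)]
      simp only [List.takeWhile_cons, List.dropWhile_cons, hx', Bool.false_eq_true,
        if_false, createGroupsGo, List.nil_append]
      rw [createGroupsGo_cons]
      simp
    · have hx' : (fun c => !PySem.Str.startswith c "G(") x = true := by
        simp only [Bool.not_eq_true', eq_false_of_ne_true hx]
      simp only [List.foldl_cons, if_neg hx]
      rw [ih gs (cur ++ [x]) (by simp)]
      simp only [List.takeWhile_cons, List.dropWhile_cons, hx', if_true]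
      simp

-- ===== VERDICT (by name: the statement is the Claim_ definition above) =====
theorem create_groups_spec : Claim_equal_create_groups := by
  intro xs _
  unfold Spec_create_groups create_groups
  cases xs with
  | nil => simp [create_groups_alt, createGroupsGo]
  | cons x rest =>
    have h1 : (List.foldl
        (fun (s : List (List String) × List String) constraint =>
          if PySem.Str.startswith constraint "G(" then
            ((if s.2 ≠ [] then s.1 ++ [s.2] else s.1), [constraint])
          else
            (s.1, s.2 ++ [constraint]))
        ([], []) (x :: rest))
        = (List.foldl
        (fun (s : List (List String) × List String) constraint =>
          if PySem.Str.startswith constraint "G(" then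
            ((if s.2 ≠ [] then s.1 ++ [s.2] else s.1), [constraint])
          else
            (s.1, s.2 ++ [constraint]))
        (([], [x]) : List (List String) × List String) rest) := by
      by_cases hx : PySem.Str.startswith x "G(" = true
      · simp [List.foldl_cons]
      · simp [List.foldl_cons]
    simp only [h1]
    rw [create_groups_run rest [] [x] (by simp)]
    unfold create_groups_alt
    rw [createGroupsGo]
    simp only [List.nil_append]
    rw [createGroupsGo_cons]
    simp
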